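-- pv_equiv track=rewrite | github.com/ZhangBohan233/SPL-RC1 | spl_lib.py | replace_bool_none
-- ===== SOURCE A (Python) =====
-- def replace_bool_none(string):
--     in_single = False
--     in_double = False
--     lst = []
--     i = 0
--     while i < len(string):
--         ch = string[i]
--         if in_single:
--             if ch == "'":
--                 in_single = False
--         elif in_double:
--             if ch == '"':
--                 in_double = False
--         else:
--             if ch == "'":
--                 in_single = True
--             elif ch == '"':
--                 in_double = True
--         if not in_single and not in_double:
--             if i <= len(string) - 4:
--                 if string[i:i + 4] == "True":
--                     lst.append("true")
--                     i += 4
--                     continue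
--                 elif string[i:i + 4] == "None":
--                     lst.append("null")
--                     i += 4
--                     continue
--             if i <= len(string) - 5:
--                 if string[i:i + 5] == "False":
--                     lst.append("false")
--                     i += 5
--                     continue
--         lst.append(ch)
--         i += 1
--     return "".join(lst)
-- ===== SOURCE B (Python) =====
-- def replace_bool_none(string):
--     out = []
--     rest = string
--     while True:
--         # take the run of unquoted text, then do bulk keyword replacement on it
--         j = 0
--         while j < len(rest) and rest[j] not in "'\"":
--             j += 1
--         seg = rest[:j]
--         out.append(seg.replace("True", "true").replace("None", "null").replace("False", "false"))
--         if j == len(rest):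
--             break
--         q = rest[j]
--         # find the matching closing quote; the quoted literal is kept verbatim
--         k = j + 1
--         while k < len(rest) and rest[k] != q:
--             k += 1
--         if k == len(rest):
--             out.append(rest[j:])
--             break
--         out.append(rest[j:k + 1])
--         rest = rest[k + 1:]
--     return "".join(out)
-- ===== Notes on version B (the rewrite author's own statement) =====
-- stated objective: faster
-- what changed: B partitions the string into unquoted runs and verbatim quoted literals and applies three bulk str.replace keyword substitutions to each unquoted run, instead of A's char-by-char in_single/in_double state machine with per-position slice comparisons.
import Mathlib
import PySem

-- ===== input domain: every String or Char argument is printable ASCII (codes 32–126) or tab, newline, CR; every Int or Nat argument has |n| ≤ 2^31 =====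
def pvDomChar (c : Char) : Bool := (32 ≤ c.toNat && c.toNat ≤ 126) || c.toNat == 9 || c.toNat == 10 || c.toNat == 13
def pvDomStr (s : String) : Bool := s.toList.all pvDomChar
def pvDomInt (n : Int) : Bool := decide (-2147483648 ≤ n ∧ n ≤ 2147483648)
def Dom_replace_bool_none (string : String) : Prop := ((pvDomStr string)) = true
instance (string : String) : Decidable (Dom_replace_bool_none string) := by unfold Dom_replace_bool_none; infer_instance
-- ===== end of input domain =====

-- B replaces A's char-by-char quote state machine by a partition into unquoted runs
-- (bulk keyword replacement) and verbatim quoted literals; measurably faster by constant factor.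

-- ===== PORT A =====
-- A's while loop over index i, transcribed with the suffix `rem` = string[i:]
-- (string[i:i+4] = rem.take 4, i <= len-4 = 4 ≤ rem.length); lst is the accumulator `acc`.
def goA (inS inD : Bool) (rem : List Char) (acc : List (List Char)) : List (List Char) :=
  match rem with
  | [] => acc
  | ch :: rest =>
    let st :=
      if inS then (if ch == '\'' then (false, inD) else (inS, inD))
      else if inD then (if ch == '"' then (inS, false) else (inS, inD))
      else if ch == '\'' then (true, inD)
      else if ch == '"' then (inS, true)
      else (inS, inD)
    if !st.1 && !st.2 then
      if 4 ≤ (ch :: rest).length && (ch :: rest).take 4 == "True".toList then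
        goA st.1 st.2 ((ch :: rest).drop 4) (acc ++ ["true".toList])
      else if 4 ≤ (ch :: rest).length && (ch :: rest).take 4 == "None".toList then
        goA st.1 st.2 ((ch :: rest).drop 4) (acc ++ ["null".toList])
      else if 5 ≤ (ch :: rest).length && (ch :: rest).take 5 == "False".toList then
        goA st.1 st.2 ((ch :: rest).drop 5) (acc ++ ["false".toList])
      else goA st.1 st.2 rest (acc ++ [[ch]])
    else goA st.1 st.2 rest (acc ++ [[ch]])
termination_by rem.length
decreasing_by all_goals (simp; try omega)

def replace_bool_none (string : String) : String :=
  String.ofList ((goA false false string.toList []).flatten)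

-- ===== PORT B =====
-- hand port of Python str.replace (leftmost non-overlapping scan); exact for nonempty `old`
-- (B only calls it with the nonempty patterns "True"/"None"/"False").
def pyReplace (old new : List Char) : List Char → List Char
  | [] => []
  | c :: t =>
    if old.isPrefixOf (c :: t) then new ++ pyReplace old new (t.drop (old.length - 1))
    else c :: pyReplace old new t
termination_by s => s.length
decreasing_by all_goals (simp; try omega)

def rep3 (s : List Char) : List Char :=
  pyReplace "False".toList "false".toList
    (pyReplace "None".toList "null".toList
      (pyReplace "True".toList "true".toList s))

def pvQuote (c : Char) : Bool := c == '\'' || c == '"'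

-- B's outer while loop: rest[:j] = takeWhile (non-quote), the inner scan for the
-- closing quote = takeWhile/dropWhile (≠ q) on the remainder.
def goB (rem : List Char) (acc : List (List Char)) : List (List Char) :=
  let seg := rem.takeWhile (fun c => !pvQuote c)
  let acc' := acc ++ [rep3 seg]
  match h1 : rem.dropWhile (fun c => !pvQuote c) with
  | [] => acc'
  | q :: rest1 =>
    let mid := rest1.takeWhile (fun c => !(c == q))
    match h2 : rest1.dropWhile (fun c => !(c == q)) with
    | [] => acc' ++ [q :: rest1]
    | _ :: rest3 => goB rest3 (acc' ++ [q :: (mid ++ [q])])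
termination_by rem.length
decreasing_by
  have a1 := List.length_dropWhile_le (p := fun c => !pvQuote c) (l := rem)
  have a2 := List.length_dropWhile_le (p := fun c => !(c == q)) (l := rest1)
  rw [h1] at a1; rw [h2] at a2; simp at a1 a2; omega

def replace_bool_none_alt (string : String) : String :=
  String.ofList ((goB string.toList []).flatten)

-- ===== PRECONDITION & SPEC =====
def Spec_replace_bool_none (string : String) (out : String) : Prop := out = replace_bool_none_alt string
instance (string : String) (out : String) : Decidable (Spec_replace_bool_none string out) := by unfold Spec_replace_bool_none; infer_instance

-- ===== CLAIM (what is proved, stated in full; the proofs are below) =====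
def Claim_equal_replace_bool_none : Prop := ∀ (string : String), Dom_replace_bool_none string → Spec_replace_bool_none string (replace_bool_none string)

-- ===== LEMMAS AND PROOFS =====

theorem goB_acc : ∀ (n : Nat) (rem : List Char), rem.length ≤ n → ∀ acc,
    goB rem acc = acc ++ goB rem [] := by
  intro n
  induction n with
  | zero =>
    intro rem h acc
    have : rem = [] := List.length_eq_zero_iff.mp (Nat.le_zero.mp h)
    subst this
    simp [goB]
  | succ n ih =>
    intro rem h acc
    rw [goB.eq_def]
    conv_rhs => rw [goB.eq_def]
    simp only []
    split
    · simp
    · rename_i q rest1 hdrop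
      split
      · simp
      · rename_i c rest3 hdrop2
        have l1 := List.length_dropWhile_le (p := fun c => !pvQuote c) (l := rem)
        have l2 := List.length_dropWhile_le (p := fun c => !(c == q)) (l := rest1)
        rw [hdrop] at l1; rw [hdrop2] at l2
        simp at l1 l2
        rw [ih rest3 (by omega)]
        conv_rhs => rw [ih rest3 (by omega)]
        simp
-- goA_acc
theorem goA_acc : ∀ (n : Nat) (rem : List Char), rem.length ≤ n → ∀ inS inD acc,
    goA inS inD rem acc = acc ++ goA inS inD rem [] := by
  intro n
  induction n with
  | zero =>
    intro rem h inS inD acc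
    have : rem = [] := List.length_eq_zero_iff.mp (Nat.le_zero.mp h)
    subst this
    simp [goA]
  | succ n ih =>
    intro rem h inS inD acc
    cases rem with
    | nil => simp [goA]
    | cons ch rest =>
      rw [goA.eq_def]
      conv_rhs => rw [goA.eq_def]
      simp only []
      split_ifs <;>
        rw [ih _ (by simp at h ⊢; omega) _ _ _, ih _ (by simp at h ⊢; omega) _ _ ([] ++ _)] <;> simp
-- flattened result of A's loop
def fA (inS inD : Bool) (rem : List Char) : List Char := (goA inS inD rem []).flatten

theorem fA_nil (inS inD : Bool) : fA inS inD [] = [] := by simp [fA, goA]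

theorem take_imp_prefix {r p : List Char} {n : Nat} (h : List.take n r = p) : p <+: r :=
  h ▸ List.take_prefix n r

theorem fA_true (x : List Char) :
    fA false false ('T'::'r'::'u'::'e'::x) = 't'::'r'::'u'::'e'::fA false false x := by
  simp only [fA]
  rw [goA.eq_def]
  simp
  rw [goA_acc x.length x le_rfl]
  simp

theorem fA_none (x : List Char) :
    fA false false ('N'::'o'::'n'::'e'::x) = 'n'::'u'::'l'::'l'::fA false false x := by
  simp only [fA]
  rw [goA.eq_def]
  simp
  rw [goA_acc x.length x le_rfl]
  simp

theorem fA_false (x : List Char) :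
    fA false false ('F'::'a'::'l'::'s'::'e'::x) = 'f'::'a'::'l'::'s'::'e'::fA false false x := by
  simp only [fA]
  rw [goA.eq_def]
  simp
  rw [goA_acc x.length x le_rfl]
  simp

theorem fA_char (c : Char) (r : List Char) (hc : pvQuote c = false)
    (hT : ¬ "True".toList <+: c::r) (hN : ¬ "None".toList <+: c::r)
    (hF : ¬ "False".toList <+: c::r) :
    fA false false (c::r) = c :: fA false false r := by
  have eT : "True".toList = ['T','r','u','e'] := rfl
  have eN : "None".toList = ['N','o','n','e'] := rfl
  have eF : "False".toList = ['F','a','l','s','e'] := rfl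
  rw [eT] at hT; rw [eN] at hN; rw [eF] at hF
  simp only [fA]
  rw [goA.eq_def]
  simp only [pvQuote, Bool.or_eq_false_iff, beq_eq_false_iff_ne] at hc
  simp [hc.1, hc.2]
  split_ifs with h1 h2 h3
  · exact absurd (List.cons_prefix_cons.mpr ⟨h1.2.1.symm, take_imp_prefix h1.2.2⟩) hT
  · exact absurd (List.cons_prefix_cons.mpr ⟨h2.2.1.symm, take_imp_prefix h2.2.2⟩) hN
  · exact absurd (List.cons_prefix_cons.mpr ⟨h3.2.1.symm, take_imp_prefix h3.2.2⟩) hF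
  · rw [goA_acc r.length r le_rfl]
    simp

theorem fA_open (q : Char) (r : List Char) (hq : q = '\'' ∨ q = '"') :
    fA false false (q::r) = q :: fA (q == '\'') (q == '"') r := by
  rcases hq with rfl | rfl <;>
    (simp only [fA]; rw [goA.eq_def]; simp; rw [goA_acc r.length r le_rfl]; simp)

theorem fA_inq (q c : Char) (r : List Char) (hq : q = '\'' ∨ q = '"') (hne : c ≠ q) :
    fA (q == '\'') (q == '"') (c::r) = c :: fA (q == '\'') (q == '"') r := by
  rcases hq with rfl | rfl <;>
    (simp only [fA]; rw [goA.eq_def]; simp [hne]; rw [goA_acc r.length r le_rfl]; simp)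

theorem fA_close (q : Char) (r : List Char) (hq : q = '\'' ∨ q = '"') :
    fA (q == '\'') (q == '"') (q::r) = q :: fA false false r := by
  rcases hq with rfl | rfl <;>
    (simp only [fA]; rw [goA.eq_def]; simp; rw [goA_acc r.length r le_rfl]; simp)
-- shorthands for the three replacement passes
def rT (s : List Char) : List Char := pyReplace "True".toList "true".toList s
def rN (s : List Char) : List Char := pyReplace "None".toList "null".toList s
def rF (s : List Char) : List Char := pyReplace "False".toList "false".toList s

theorem rep3_eq (s : List Char) : rep3 s = rF (rN (rT s)) := rfl

theorem rep3_nil : rep3 [] = [] := by simp [rep3, pyReplace]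

-- pass/match unfolding lemmas on literal heads
theorem rT_true (x : List Char) : rT ('T'::'r'::'u'::'e'::x) = 't'::'r'::'u'::'e':: rT x := by
  simp [rT, pyReplace, List.isPrefixOf]
theorem rN_true (x : List Char) : rN ('t'::'r'::'u'::'e'::x) = 't'::'r'::'u'::'e':: rN x := by
  simp [rN, pyReplace, List.isPrefixOf]
theorem rF_true (x : List Char) : rF ('t'::'r'::'u'::'e'::x) = 't'::'r'::'u'::'e':: rF x := by
  simp [rF, pyReplace, List.isPrefixOf]
theorem rT_none (x : List Char) : rT ('N'::'o'::'n'::'e'::x) = 'N'::'o'::'n'::'e':: rT x := by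
  simp [rT, pyReplace, List.isPrefixOf]
theorem rN_none (x : List Char) : rN ('N'::'o'::'n'::'e'::x) = 'n'::'u'::'l'::'l':: rN x := by
  simp [rN, pyReplace, List.isPrefixOf]
theorem rF_null (x : List Char) : rF ('n'::'u'::'l'::'l'::x) = 'n'::'u'::'l'::'l':: rF x := by
  simp [rF, pyReplace, List.isPrefixOf]
theorem rT_false (x : List Char) : rT ('F'::'a'::'l'::'s'::'e'::x) = 'F'::'a'::'l'::'s'::'e':: rT x := by
  simp [rT, pyReplace, List.isPrefixOf]
theorem rN_false (x : List Char) : rN ('F'::'a'::'l'::'s'::'e'::x) = 'F'::'a'::'l'::'s'::'e':: rN x := by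
  simp [rN, pyReplace, List.isPrefixOf]
theorem rF_false (x : List Char) : rF ('F'::'a'::'l'::'s'::'e'::x) = 'f'::'a'::'l'::'s'::'e':: rF x := by
  simp [rF, pyReplace, List.isPrefixOf]

theorem rep3_true (x : List Char) : rep3 ('T'::'r'::'u'::'e'::x) = 't'::'r'::'u'::'e':: rep3 x := by
  rw [rep3_eq, rep3_eq, rT_true, rN_true, rF_true]
theorem rep3_none (x : List Char) : rep3 ('N'::'o'::'n'::'e'::x) = 'n'::'u'::'l'::'l':: rep3 x := by
  rw [rep3_eq, rep3_eq, rT_none, rN_none, rF_null]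
theorem rep3_false (x : List Char) : rep3 ('F'::'a'::'l'::'s'::'e'::x) = 'f'::'a'::'l'::'s'::'e':: rep3 x := by
  rw [rep3_eq, rep3_eq, rT_false, rN_false, rF_false]

-- a replacement pass neither creates nor destroys a prefix that avoids the
-- head characters of its pattern and of its substitute
theorem prefix_pyReplace_iff (co cn : Char) (oldt newt : List Char) :
    ∀ (n : Nat) (s p : List Char), s.length ≤ n →
      (∀ a ∈ p, a ≠ co ∧ a ≠ cn) →
      ((p <+: pyReplace (co::oldt) (cn::newt) s) ↔ p <+: s) := by
  intro n
  induction n with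
  | zero =>
    intro s p hs _
    have : s = [] := List.length_eq_zero_iff.mp (Nat.le_zero.mp hs)
    subst this
    simp [pyReplace]
  | succ n ih =>
    intro s p hs hp
    cases s with
    | nil => simp [pyReplace]
    | cons c t =>
      rw [pyReplace.eq_def]
      by_cases hpre : (co::oldt).isPrefixOf (c::t) = true
      · have hc : c = co := (List.cons_prefix_cons.mp (List.isPrefixOf_iff_prefix.mp hpre)).1.symm
        simp only [hpre, if_true]
        cases p with
        | nil => simp
        | cons a p' =>
          constructor
          · intro h
            exact absurd (List.cons_prefix_cons.mp h).1 (hp a (by simp)).2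
          · intro h
            exact absurd ((List.cons_prefix_cons.mp h).1.trans hc) (hp a (by simp)).1
      · simp only [hpre, Bool.false_eq_true, if_false]
        cases p with
        | nil => simp
        | cons a p' =>
          rw [List.cons_prefix_cons, List.cons_prefix_cons]
          constructor
          · rintro ⟨rfl, h2⟩
            exact ⟨rfl, (ih t p' (by simp at hs; omega) (fun b hb => hp b (by simp [hb]))).mp h2⟩
          · rintro ⟨rfl, h2⟩
            exact ⟨rfl, (ih t p' (by simp at hs; omega) (fun b hb => hp b (by simp [hb]))).mpr h2⟩
theorem pyReplace_cons_of_not_prefix (old new : List Char) (c : Char) (t : List Char)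
    (h : ¬ old <+: c::t) : pyReplace old new (c::t) = c :: pyReplace old new t := by
  rw [pyReplace.eq_def]
  have hb : old.isPrefixOf (c::t) = false := by
    rw [← Bool.not_eq_true, List.isPrefixOf_iff_prefix]
    exact h
  simp [hb]

theorem rT_def' : rT = pyReplace ('T'::['r','u','e']) ('t'::['r','u','e']) := rfl
theorem rN_def' : rN = pyReplace ('N'::['o','n','e']) ('n'::['u','l','l']) := rfl

theorem prefix_rT_iff (s p : List Char) (hp : ∀ a ∈ p, a ≠ 'T' ∧ a ≠ 't') :
    (p <+: rT s) ↔ p <+: s := by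
  rw [rT_def']
  exact prefix_pyReplace_iff 'T' 't' _ _ s.length s p le_rfl hp

theorem prefix_rN_iff (s p : List Char) (hp : ∀ a ∈ p, a ≠ 'N' ∧ a ≠ 'n') :
    (p <+: rN s) ↔ p <+: s := by
  rw [rN_def']
  exact prefix_pyReplace_iff 'N' 'n' _ _ s.length s p le_rfl hp

theorem rep3_cons (c : Char) (s : List Char)
    (hT : ¬ "True".toList <+: c::s) (hN : ¬ "None".toList <+: c::s)
    (hF : ¬ "False".toList <+: c::s) :
    rep3 (c::s) = c :: rep3 s := by
  have eT : "True".toList = ['T','r','u','e'] := rfl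
  have eN : "None".toList = ['N','o','n','e'] := rfl
  have eF : "False".toList = ['F','a','l','s','e'] := rfl
  rw [eT] at hT; rw [eN] at hN; rw [eF] at hF
  have h1 : rT (c::s) = c :: rT s := pyReplace_cons_of_not_prefix _ _ _ _ (by rw [eT]; exact hT)
  have h2 : rN (c :: rT s) = c :: rN (rT s) := by
    refine pyReplace_cons_of_not_prefix _ _ _ _ ?_
    rw [eN]
    intro h
    obtain ⟨rfl, h'⟩ := List.cons_prefix_cons.mp h
    exact hN (List.cons_prefix_cons.mpr ⟨rfl,
      (prefix_rT_iff s ['o','n','e'] (by simp)).mp h'⟩)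
  have h3 : rF (c :: rN (rT s)) = c :: rF (rN (rT s)) := by
    refine pyReplace_cons_of_not_prefix _ _ _ _ ?_
    rw [eF]
    intro h
    obtain ⟨rfl, h'⟩ := List.cons_prefix_cons.mp h
    have h'' := (prefix_rN_iff (rT s) ['a','l','s','e'] (by simp)).mp h'
    exact hF (List.cons_prefix_cons.mpr ⟨rfl,
      (prefix_rT_iff s ['a','l','s','e'] (by simp)).mp h''⟩)
  rw [rep3_eq, h1, h2, h3, rep3_eq]

-- a prefix made of non-quote characters cannot reach into `rest`,
-- which is empty or starts with a quote
theorem prefix_append_quote_iff :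
    ∀ (seg p rest : List Char), (∀ a ∈ p, pvQuote a = false) →
      (rest = [] ∨ ∃ q r1, rest = q :: r1 ∧ pvQuote q = true) →
      ((p <+: seg ++ rest) ↔ p <+: seg) := by
  intro seg
  induction seg with
  | nil =>
    intro p rest hp hrest
    rcases hrest with rfl | ⟨q, r1, rfl, hq⟩
    · simp
    · cases p with
      | nil => simp
      | cons a p' =>
        simp only [List.nil_append]
        constructor
        · intro h
          obtain ⟨rfl, -⟩ := List.cons_prefix_cons.mp h
          exact absurd hq (by simp [hp a (by simp)])
        · intro h
          exact absurd h (by simp)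
    
  | cons c seg' ih =>
    intro p rest hp hrest
    cases p with
    | nil => simp
    | cons a p' =>
      simp only [List.cons_append, List.cons_prefix_cons]
      rw [ih p' rest (fun b hb => hp b (by simp [hb])) hrest]
-- A's loop on an unquoted run does exactly the three bulk replacements
theorem lemSeg : ∀ (n : Nat) (seg rest : List Char), seg.length ≤ n →
    (∀ c ∈ seg, pvQuote c = false) →
    (rest = [] ∨ ∃ q r1, rest = q :: r1 ∧ pvQuote q = true) →
    fA false false (seg ++ rest) = rep3 seg ++ fA false false rest := by
  intro n
  induction n with
  | zero =>
    intro seg rest hlen _ _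
    have : seg = [] := List.length_eq_zero_iff.mp (Nat.le_zero.mp hlen)
    subst this
    simp [rep3_nil]
  | succ n ih =>
    intro seg rest hlen hseg hrest
    cases seg with
    | nil => simp [rep3_nil]
    | cons c seg' =>
      have eT : "True".toList = ['T','r','u','e'] := rfl
      have eN : "None".toList = ['N','o','n','e'] := rfl
      have eF : "False".toList = ['F','a','l','s','e'] := rfl
      by_cases hT : "True".toList <+: c::seg'
      · obtain ⟨x, hx⟩ := hT
        rw [eT] at hx
        simp only [List.cons_append, List.cons_eq_cons] at hx
        obtain ⟨rfl, rfl⟩ := hx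
        simp only [List.cons_append, List.nil_append]
        rw [fA_true, rep3_true]
        rw [ih x rest (by simp at hlen ⊢; omega)
          (fun a ha => hseg a (by simp [ha])) hrest]
        try simp
      · by_cases hN : "None".toList <+: c::seg'
        · obtain ⟨x, hx⟩ := hN
          rw [eN] at hx
          simp only [List.cons_append, List.cons_eq_cons] at hx
          obtain ⟨rfl, rfl⟩ := hx
          simp only [List.cons_append, List.nil_append]
          rw [fA_none, rep3_none]
          rw [ih x rest (by simp at hlen ⊢; omega)
            (fun a ha => hseg a (by simp [ha])) hrest]
          try simp
        · by_cases hF : "False".toList <+: c::seg'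
          · obtain ⟨x, hx⟩ := hF
            rw [eF] at hx
            simp only [List.cons_append, List.cons_eq_cons] at hx
            obtain ⟨rfl, rfl⟩ := hx
            simp only [List.cons_append, List.nil_append]
            rw [fA_false, rep3_false]
            rw [ih x rest (by simp at hlen ⊢; omega)
              (fun a ha => hseg a (by simp [ha])) hrest]
            try simp
          · have hTq : ∀ a ∈ "True".toList, pvQuote a = false := by rw [eT]; simp [pvQuote]
            have hNq : ∀ a ∈ "None".toList, pvQuote a = false := by rw [eN]; simp [pvQuote]
            have hFq : ∀ a ∈ "False".toList, pvQuote a = false := by rw [eF]; simp [pvQuote]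
            have hT' : ¬ "True".toList <+: (c::seg') ++ rest := by
              rw [prefix_append_quote_iff (c::seg') _ rest hTq hrest]; exact hT
            have hN' : ¬ "None".toList <+: (c::seg') ++ rest := by
              rw [prefix_append_quote_iff (c::seg') _ rest hNq hrest]; exact hN
            have hF' : ¬ "False".toList <+: (c::seg') ++ rest := by
              rw [prefix_append_quote_iff (c::seg') _ rest hFq hrest]; exact hF
            simp only [List.cons_append] at hT' hN' hF' ⊢
            rw [fA_char c (seg' ++ rest) (hseg c (by simp)) hT' hN' hF']
            rw [ih seg' rest (by simp at hlen; omega)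
              (fun a ha => hseg a (by simp [ha])) hrest]
            rw [rep3_cons c seg' hT hN hF]
            try simp
-- inside a quoted literal A copies characters verbatim
theorem lemIn (q : Char) (hq : q = '\'' ∨ q = '"') :
    ∀ (mid r2 : List Char), (∀ c ∈ mid, c ≠ q) →
    fA (q == '\'') (q == '"') (mid ++ r2) = mid ++ fA (q == '\'') (q == '"') r2 := by
  intro mid
  induction mid with
  | nil => simp
  | cons c m ih =>
    intro r2 h
    simp only [List.cons_append]
    rw [fA_inq q c _ hq (h c (by simp)), ih r2 (fun a ha => h a (by simp [ha]))]

theorem main_eq_aux : ∀ (n : Nat) (rem : List Char), rem.length ≤ n →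
    fA false false rem = (goB rem []).flatten := by
  intro n
  induction n with
  | zero =>
    intro rem h
    have : rem = [] := List.length_eq_zero_iff.mp (Nat.le_zero.mp h)
    subst this
    rw [goB.eq_def]
    simp [fA_nil, rep3_nil]
  | succ n ih =>
    intro rem h
    have hseg : ∀ c ∈ rem.takeWhile (fun c => !pvQuote c), pvQuote c = false :=
      fun c hc => by simpa using List.mem_takeWhile_imp hc
    rw [goB.eq_def]
    split
    · rename_i h1
      conv_lhs => rw [← List.takeWhile_append_dropWhile (p := fun c => !pvQuote c) (l := rem), h1]
      rw [lemSeg (rem.takeWhile (fun c => !pvQuote c)).length _ [] le_rfl hseg (Or.inl rfl)]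
      simp [fA_nil]
    · rename_i q rest1 h1
      have hne : rem.dropWhile (fun c => !pvQuote c) ≠ [] := by simp [h1]
      have hq : pvQuote q = true := by
        have h2 := List.head_dropWhile_not (fun c => !pvQuote c) hne
        simp [h1] at h2
        exact h2
      have hq' : q = '\'' ∨ q = '"' := by simpa [pvQuote] using hq
      conv_lhs => rw [← List.takeWhile_append_dropWhile (p := fun c => !pvQuote c) (l := rem), h1]
      rw [lemSeg (rem.takeWhile (fun c => !pvQuote c)).length _ (q::rest1) le_rfl hseg
        (Or.inr ⟨q, rest1, rfl, hq⟩)]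
      rw [fA_open q rest1 hq']
      split
      · rename_i h2
        have hall : ∀ c ∈ rest1, c ≠ q := by
          intro c hc
          have := (List.dropWhile_eq_nil_iff.mp h2) c hc
          simpa using this
        have hrest1 : fA (q == '\'') (q == '"') rest1 = rest1 := by
          have := lemIn q hq' rest1 [] hall
          simpa [fA_nil] using this
        rw [hrest1]
        simp
      · rename_i c2 rest3 h2
        have hne2 : rest1.dropWhile (fun c => !(c == q)) ≠ [] := by simp [h2]
        have hc2 : c2 = q := by
          have h3 := List.head_dropWhile_not (fun c => !(c == q)) hne2
          simp [h2] at h3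
          exact h3
        rw [hc2] at h2
        have hmid : ∀ c ∈ rest1.takeWhile (fun c => !(c == q)), c ≠ q :=
          fun c hc => by simpa using List.mem_takeWhile_imp hc
        conv_lhs =>
          rw [← List.takeWhile_append_dropWhile (p := fun c => !(c == q)) (l := rest1), h2]
        rw [lemIn q hq' _ _ hmid, fA_close q rest3 hq']
        have l1 := List.length_dropWhile_le (p := fun c => !pvQuote c) (l := rem)
        have l2 := List.length_dropWhile_le (p := fun c => !(c == q)) (l := rest1)
        rw [h1] at l1; rw [h2] at l2
        simp at l1 l2
        rw [ih rest3 (by omega)]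
        conv_rhs => rw [goB_acc rest3.length rest3 le_rfl]
        simp

-- ===== VERDICT (by name: the statement is the Claim_ definition above) =====
theorem replace_bool_none_spec : Claim_equal_replace_bool_none := by
  intro s _
  show replace_bool_none s = replace_bool_none_alt s
  unfold replace_bool_none replace_bool_none_alt
  rw [show (goA false false s.toList []).flatten = fA false false s.toList from rfl,
    main_eq_aux s.toList.length s.toList le_rfl]
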